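-- pv_equiv track=rewrite | github.com/wweschen/coqa-client | client/api/tf_api.py | reverse_qas
-- ===== SOURCE A (Python) =====
-- def reverse_qas(qa_str, marker_str):
--     ques = []
--     ans = []
--
--     qas = []
--     k = 0
--     marks = marker_str.split()
--     qas_str = qa_str.split()
--     for i in range(len(marks)):
--         l = len(marks[i])
--         qas.append(qas_str[k:k + l])
--         k += l
--
--     for ms, qas in zip(marks, qas):
--         q = []
--         a = []
--         for m, qa in zip(ms, qas):
--             if m == 'Q':
--                 q.append(qa)
--             if m == 'A':
--                 a.append(qa)
--         ques.append(' '.join(q))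
--         ans.append(' '.join(a))
--     return ques, ans
-- ===== SOURCE B (Python) =====
-- def reverse_qas(qa_str, marker_str):
--     # Flatten-and-scatter: label every marker char with its segment index, zip the
--     # flat label stream against the tokens once, and scatter each token into a
--     # preallocated per-segment bucket; no chunk slicing, no nested segment loop.
--     marks = marker_str.split()
--     labels = [(i, c) for i, ms in enumerate(marks) for c in ms]
--     qbuf = [[] for _ in marks]
--     abuf = [[] for _ in marks]
--     for (i, c), tok in zip(labels, qa_str.split()):
--         if c == 'Q':
--             qbuf[i].append(tok)
--         elif c == 'A':
--             abuf[i].append(tok)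
--     return [' '.join(q) for q in qbuf], [' '.join(a) for a in abuf]
-- ===== Notes on version B (the rewrite author's own statement) =====
-- stated objective: alternative
-- what changed: Replaces A's chunk-slicing plus nested classify loops by flatten-and-scatter: label each marker char with its segment index, zip the flat label stream once against the tokens, and scatter each token into preallocated per-segment buckets that are joined at the end.
import Mathlib
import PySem

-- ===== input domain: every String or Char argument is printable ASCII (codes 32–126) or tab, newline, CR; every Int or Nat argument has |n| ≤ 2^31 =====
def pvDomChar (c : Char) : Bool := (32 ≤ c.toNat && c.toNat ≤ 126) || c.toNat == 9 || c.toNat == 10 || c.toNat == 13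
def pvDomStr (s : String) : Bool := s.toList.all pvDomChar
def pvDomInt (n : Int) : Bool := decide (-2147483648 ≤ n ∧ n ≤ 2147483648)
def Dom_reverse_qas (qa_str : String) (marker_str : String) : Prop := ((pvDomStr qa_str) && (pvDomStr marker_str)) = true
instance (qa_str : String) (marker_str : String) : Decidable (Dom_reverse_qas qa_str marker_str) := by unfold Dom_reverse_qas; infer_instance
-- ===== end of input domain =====

-- B replaces A's chunk-slicing nested loops by flatten-and-scatter: one flat zip of
-- segment-labelled marker chars against the tokens, scattered into preallocated
-- per-segment buckets (objective: alternative decomposition, same asymptotic cost).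

-- ===== PORT A =====
def reverse_qas (qa_str : String) (marker_str : String) : List String × List String :=
  let ques : List String := []
  let ans : List String := []
  let marks := PySem.Str.split₀ marker_str
  let qas_str := PySem.Str.split₀ qa_str
  -- first loop: for i in range(len(marks)): qas.append(qas_str[k:k+l]); k += l
  let st :=
    (PySem.List.pyRange 0 (PySem.List.len marks)).foldl
      (fun (st : List (List String) × Int) i =>
        (st.1 ++ [PySem.List.slice qas_str (some st.2)
                    (some (st.2 + PySem.Str.len (PySem.List.pyGetD marks i "")))],
         st.2 + PySem.Str.len (PySem.List.pyGetD marks i "")))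
      ([], 0)
  -- second loop over zip(marks, qas)
  (marks.zip st.1).foldl
    (fun (acc : List String × List String) p =>
      let qa :=
        (p.1.toList.zip p.2).foldl
          (fun (qa : List String × List String) mqa =>
            let qa := if mqa.1 = 'Q' then (qa.1 ++ [mqa.2], qa.2) else qa
            if mqa.1 = 'A' then (qa.1, qa.2 ++ [mqa.2]) else qa)
          ([], [])
      (acc.1 ++ [PySem.Str.join " " qa.1], acc.2 ++ [PySem.Str.join " " qa.2]))
    (ques, ans)

-- ===== PORT B =====
-- labels = [(i, c) for i, ms in enumerate(marks) for c in ms]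
def reverse_qas_labels (marks : List String) : List (Int × Char) :=
  (PySem.List.enumerate marks).flatMap (fun p => p.2.toList.map (fun c => (p.1, c)))

-- the scatter loop body of Source B: classify one (label, token) pair into the buckets
-- (the bucket index comes from enumerate, hence is a nonnegative Int: .toNat is exact)
def reverse_qas_scatter (st : List (List String) × List (List String))
    (p : (Int × Char) × String) : List (List String) × List (List String) :=
  if p.1.2 = 'Q' then (st.1.modify p.1.1.toNat (· ++ [p.2]), st.2)
  else if p.1.2 = 'A' then (st.1, st.2.modify p.1.1.toNat (· ++ [p.2]))
  else st

def reverse_qas_alt (qa_str : String) (marker_str : String) : List String × List String :=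
  let marks := PySem.Str.split₀ marker_str
  let labels := reverse_qas_labels marks
  let qbuf : List (List String) := marks.map (fun _ => [])
  let abuf : List (List String) := marks.map (fun _ => [])
  let st := (labels.zip (PySem.Str.split₀ qa_str)).foldl reverse_qas_scatter (qbuf, abuf)
  (st.1.map (PySem.Str.join " "), st.2.map (PySem.Str.join " "))

-- ===== PRECONDITION & SPEC =====
def Spec_reverse_qas (qa_str : String) (marker_str : String) (out : List String × List String) : Prop := out = reverse_qas_alt qa_str marker_str
instance (qa_str : String) (marker_str : String) (out : List String × List String) : Decidable (Spec_reverse_qas qa_str marker_str out) := by unfold Spec_reverse_qas; infer_instance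

-- ===== CLAIM =====
def Claim_equal_reverse_qas : Prop := ∀ (qa_str : String) (marker_str : String), Dom_reverse_qas qa_str marker_str → Spec_reverse_qas qa_str marker_str (reverse_qas qa_str marker_str)

-- ===== LEMMAS AND PROOFS =====

-- common reference value: per-segment 'Q'/'A'-filtered token lists
def pvQ (ms : String) (toks : List String) : List String :=
  ((ms.toList.zip toks).filter (fun p => p.1 == 'Q')).map Prod.snd
def pvA (ms : String) (toks : List String) : List String :=
  ((ms.toList.zip toks).filter (fun p => p.1 == 'A')).map Prod.snd
def pvChunksQ : List String → List String → List (List String)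
  | [], _ => []
  | ms :: more, toks => pvQ ms toks :: pvChunksQ more (toks.drop ms.toList.length)
def pvChunksA : List String → List String → List (List String)
  | [], _ => []
  | ms :: more, toks => pvA ms toks :: pvChunksA more (toks.drop ms.toList.length)

-- A's chunk list, as built by its first loop
def pvChunks (marks : List String) (rest : List String) : List (List String) :=
  match marks with
  | [] => []
  | ms :: more => rest.take ms.toList.length :: pvChunks more (rest.drop ms.toList.length)

theorem pvZipTake {α β : Type} (xs : List α) (ys : List β) :
    xs.zip (ys.take xs.length) = xs.zip ys := by
  induction xs generalizing ys with
  | nil => simp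
  | cons x xs ih => cases ys with
    | nil => simp
    | cons y ys => simp [List.zip_cons_cons, ih]

theorem pvChunkFold (marks tokens : List String) (acc : List (List String)) (k : Nat) :
    (marks.foldl
      (fun (st : List (List String) × Int) ms =>
        (st.1 ++ [PySem.List.slice tokens (some st.2) (some (st.2 + PySem.Str.len ms))],
         st.2 + PySem.Str.len ms)) (acc, (k : Int))).1
    = acc ++ pvChunks marks (tokens.drop k) := by
  induction marks generalizing acc k with
  | nil => simp [pvChunks]
  | cons ms more ih =>
      simp only [List.foldl_cons]
      have h1 : PySem.List.slice tokens (some (k : Int)) (some ((k : Int) + PySem.Str.len ms))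
          = (tokens.drop k).take ms.toList.length := by
        rw [PySem.Str.len_eq, PySem.List.slice_natCast_add]
      have h2 : (k : Int) + PySem.Str.len ms = ((k + ms.toList.length : Nat) : Int) := by
        rw [PySem.Str.len_eq]; push_cast; ring
      rw [h1, h2, ih]
      simp [pvChunks, List.drop_drop]

theorem pvInnerFold (pairs : List (Char × String)) (q0 a0 : List String) :
    pairs.foldl
      (fun (qa : List String × List String) mqa =>
        let qa := if mqa.1 = 'Q' then (qa.1 ++ [mqa.2], qa.2) else qa
        if mqa.1 = 'A' then (qa.1, qa.2 ++ [mqa.2]) else qa) (q0, a0)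
    = (q0 ++ (pairs.filter fun p => p.1 == 'Q').map Prod.snd,
       a0 ++ (pairs.filter fun p => p.1 == 'A').map Prod.snd) := by
  induction pairs generalizing q0 a0 with
  | nil => simp
  | cons p ps ih =>
      by_cases hq : p.1 = 'Q' <;> by_cases ha : p.1 = 'A' <;>
        simp_all [List.foldl_cons]

theorem pvOuterFold (marks rest : List String) (qacc aacc : List String) :
    ((marks.zip (pvChunks marks rest)).foldl
      (fun (acc : List String × List String) p =>
        let qa :=
          (p.1.toList.zip p.2).foldl
            (fun (qa : List String × List String) mqa =>
              let qa := if mqa.1 = 'Q' then (qa.1 ++ [mqa.2], qa.2) else qa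
              if mqa.1 = 'A' then (qa.1, qa.2 ++ [mqa.2]) else qa)
            ([], [])
        (acc.1 ++ [PySem.Str.join " " qa.1], acc.2 ++ [PySem.Str.join " " qa.2]))
      (qacc, aacc))
    = (qacc ++ (pvChunksQ marks rest).map (PySem.Str.join " "),
       aacc ++ (pvChunksA marks rest).map (PySem.Str.join " ")) := by
  induction marks generalizing rest qacc aacc with
  | nil => simp [pvChunksQ, pvChunksA]
  | cons ms more ih =>
      simp only [pvChunks, List.zip_cons_cons, List.foldl_cons]
      rw [pvInnerFold]
      simp only [pvZipTake]
      rw [ih]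
      simp [pvChunksQ, pvChunksA, pvQ, pvA]

-- characterisation of A: its result is the joined per-segment filtered chunks
theorem pvAVal (qa_str marker_str : String) :
    reverse_qas qa_str marker_str
    = ((pvChunksQ (PySem.Str.split₀ marker_str) (PySem.Str.split₀ qa_str)).map (PySem.Str.join " "),
       (pvChunksA (PySem.Str.split₀ marker_str) (PySem.Str.split₀ qa_str)).map (PySem.Str.join " ")) := by
  rw [show reverse_qas qa_str marker_str =
      (((PySem.Str.split₀ marker_str).zip
        ((PySem.List.pyRange 0 (PySem.List.len (PySem.Str.split₀ marker_str))).foldl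
           (fun (st : List (List String) × Int) i =>
             (st.1 ++ [PySem.List.slice (PySem.Str.split₀ qa_str) (some st.2)
                         (some (st.2 + PySem.Str.len (PySem.List.pyGetD (PySem.Str.split₀ marker_str) i "")))],
              st.2 + PySem.Str.len (PySem.List.pyGetD (PySem.Str.split₀ marker_str) i "")))
           ([], 0)).1).foldl
        (fun (acc : List String × List String) p =>
          let qa := (p.1.toList.zip p.2).foldl
              (fun (qa : List String × List String) mqa =>
                let qa := if mqa.1 = 'Q' then (qa.1 ++ [mqa.2], qa.2) else qa
                if mqa.1 = 'A' then (qa.1, qa.2 ++ [mqa.2]) else qa) ([], [])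
          (acc.1 ++ [PySem.Str.join " " qa.1], acc.2 ++ [PySem.Str.join " " qa.2]))
        ([], [])) from rfl]
  rw [PySem.List.foldl_pyRange_pyGetD (PySem.Str.split₀ marker_str) ""
        (fun (st : List (List String) × Int) ms =>
          (st.1 ++ [PySem.List.slice (PySem.Str.split₀ qa_str) (some st.2)
                      (some (st.2 + PySem.Str.len ms))],
           st.2 + PySem.Str.len ms)) ([], 0) (le_refl 0)]
  simp only [Int.toNat_zero, List.drop_zero]
  have h0 : ((0 : Int)) = ((0 : Nat) : Int) := rfl
  rw [h0, pvChunkFold]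
  simp only [List.nil_append, List.drop_zero]
  rw [pvOuterFold]
  simp

-- ---- B side ----

-- proof-side shape of Source B's label list, with a Nat starting index
def pvLabels : List String → Nat → List (Int × Char)
  | [], _ => []
  | ms :: more, k => ms.toList.map (fun c => ((k : Int), c)) ++ pvLabels more (k + 1)

theorem pvLabelsEq (marks : List String) (k : Nat) :
    (PySem.List.enumerate marks (k : Int)).flatMap
      (fun p => p.2.toList.map (fun c => (p.1, c))) = pvLabels marks k := by
  induction marks generalizing k with
  | nil => simp [PySem.List.enumerate_nil, pvLabels]
  | cons ms more ih =>
      rw [PySem.List.enumerate_cons]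
      have : ((k : Int) + 1) = ((k + 1 : Nat) : Int) := by push_cast; ring
      simp only [List.flatMap_cons, this, ih]
      rfl

theorem pvZipAppend {α β : Type} (l1 l2 : List α) (ys : List β) :
    (l1 ++ l2).zip ys = l1.zip ys ++ l2.zip (ys.drop l1.length) := by
  induction l1 generalizing ys with
  | nil => simp
  | cons x xs ih => cases ys with
    | nil => simp
    | cons y ys => simp [List.zip_cons_cons, ih]

theorem pvModifyModify {α : Type} (l : List α) (i : Nat) (f g : α → α) :
    (l.modify i f).modify i g = l.modify i (fun x => g (f x)) := by
  induction l generalizing i with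
  | nil => simp
  | cons x xs ih => cases i with
    | zero => simp
    | succ n => simp [ih]

theorem pvModifyAppendCons {α : Type} (P : List α) (x : α) (rest : List α) (f : α → α)
    (k : Nat) (hk : P.length = k) :
    (P ++ x :: rest).modify k f = P ++ f x :: rest := by
  subst hk
  induction P with
  | nil => simp
  | cons p ps ih => simp [ih]

-- one segment of the scatter loop = one bucket update on each side
theorem pvSegFold (ps : List (Char × String)) (k : Nat)
    (qb ab : List (List String)) :
    (ps.map (fun p => (((k : Int), p.1), p.2))).foldl reverse_qas_scatter (qb, ab)
    = (qb.modify k (· ++ (ps.filter (fun p => p.1 == 'Q')).map Prod.snd),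
       ab.modify k (· ++ (ps.filter (fun p => p.1 == 'A')).map Prod.snd)) := by
  induction ps generalizing qb ab with
  | nil =>
      simp only [List.filter_nil, List.map_nil, List.foldl_nil, List.append_nil]
      rw [show (fun x : List String => x) = @id (List String) from rfl,
        List.modify_id, List.modify_id]
  | cons p ps ih =>
      by_cases hq : p.1 = 'Q'
      · simp [reverse_qas_scatter, hq, ih, pvModifyModify]
      · by_cases ha : p.1 = 'A'
        · simp [reverse_qas_scatter, ha, ih, pvModifyModify]
        · simp [reverse_qas_scatter, hq, ha, ih]

-- the whole scatter loop fills the buckets with the per-segment chunks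
theorem pvScatterFold (marks toks : List String) (k : Nat)
    (Pq Pa : List (List String)) (hq : Pq.length = k) (ha : Pa.length = k) :
    ((pvLabels marks k).zip toks).foldl reverse_qas_scatter
      (Pq ++ List.replicate marks.length [], Pa ++ List.replicate marks.length [])
    = (Pq ++ pvChunksQ marks toks, Pa ++ pvChunksA marks toks) := by
  induction marks generalizing toks k Pq Pa with
  | nil => simp [pvLabels, pvChunksQ, pvChunksA]
  | cons ms more ih =>
      rw [show (ms :: more).length = more.length + 1 from rfl, List.replicate_succ]
      simp only [pvLabels, pvZipAppend, List.foldl_append, List.length_map]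
      rw [List.zip_map_left]
      have hmap : (ms.toList.zip toks).map (Prod.map (fun c => ((k : Int), c)) id)
          = (ms.toList.zip toks).map (fun p => (((k : Int), p.1), p.2)) := by
        simp [Prod.map]
      rw [hmap, pvSegFold,
        pvModifyAppendCons Pq _ _ _ k hq, pvModifyAppendCons Pa _ _ _ k ha,
        show ∀ (x : List String) (P : List (List String)),
            P ++ x :: List.replicate more.length [] = (P ++ [x]) ++ List.replicate more.length []
          from fun x P => by simp,
        show ∀ (x : List String) (P : List (List String)),
            P ++ x :: List.replicate more.length [] = (P ++ [x]) ++ List.replicate more.length []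
          from fun x P => by simp]
      rw [ih (toks.drop ms.toList.length) (k + 1) _ _ (by simp [hq]) (by simp [ha])]
      simp [pvChunksQ, pvChunksA, pvQ, pvA]

-- characterisation of B: the same joined chunks
theorem pvBVal (qa_str marker_str : String) :
    reverse_qas_alt qa_str marker_str
    = ((pvChunksQ (PySem.Str.split₀ marker_str) (PySem.Str.split₀ qa_str)).map (PySem.Str.join " "),
       (pvChunksA (PySem.Str.split₀ marker_str) (PySem.Str.split₀ qa_str)).map (PySem.Str.join " ")) := by
  rw [show reverse_qas_alt qa_str marker_str =
      ((((reverse_qas_labels (PySem.Str.split₀ marker_str)).zip (PySem.Str.split₀ qa_str)).foldl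
          reverse_qas_scatter
          ((PySem.Str.split₀ marker_str).map (fun _ => []),
           (PySem.Str.split₀ marker_str).map (fun _ => []))).1.map (PySem.Str.join " "),
       (((reverse_qas_labels (PySem.Str.split₀ marker_str)).zip (PySem.Str.split₀ qa_str)).foldl
          reverse_qas_scatter
          ((PySem.Str.split₀ marker_str).map (fun _ => []),
           (PySem.Str.split₀ marker_str).map (fun _ => []))).2.map (PySem.Str.join " ")) from rfl]
  unfold reverse_qas_labels
  rw [show PySem.List.enumerate (PySem.Str.split₀ marker_str)
        = PySem.List.enumerate (PySem.Str.split₀ marker_str) ((0 : Nat) : Int) from rfl,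
    pvLabelsEq (PySem.Str.split₀ marker_str) 0]
  rw [List.map_const']
  have := pvScatterFold (PySem.Str.split₀ marker_str) (PySem.Str.split₀ qa_str) 0 [] [] rfl rfl
  simp only [List.nil_append] at this
  rw [this]

-- ===== VERDICT (by name: the statement is the Claim_ definition above) =====
theorem reverse_qas_spec : Claim_equal_reverse_qas := by
  intro qa_str marker_str _
  unfold Spec_reverse_qas
  rw [pvAVal, pvBVal]
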